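-- pv_equiv track=rewrite | github.com/Fernancelot/TI-84-PLUS-CE-py-files--C959-DMI--C960-DMII | BASEBCNV.py | base_b_to_10
-- ===== SOURCE A (Python) =====
-- def digit_to_val(digit):
--     if '0' <= digit <= '9':  # Numeric digit
--         return ord(digit) - ord('0')  # Convert ASCII to decimal
--     elif 'A' <= digit.upper() <= 'F':  # Alphanumeric digit
--         return ord(digit.upper()) - ord('A') + 10  # Convert A-F to decimal (10-15)
--     else:
--         return -1  # Invalid digit
--
-- def base_b_to_10(n, b):
--     n10 = 0  # Initialize the result as 0
--     for digit in n:
--         val = digit_to_val(digit)  # Get the decimal value of the digit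
--         if val < 0 or val >= b:  # Check if the digit is invalid for the base
--             return -1  # Return -1 for invalid input
--         n10 = n10 * b + val  # Update the result using positional notation
--     return n10
-- ===== SOURCE B (Python) =====
-- def digit_to_val(digit):
--     if '0' <= digit <= '9':  # Numeric digit
--         return ord(digit) - ord('0')
--     elif 'A' <= digit.upper() <= 'F':
--         return ord(digit.upper()) - ord('A') + 10
--     else:
--         return -1
--
-- def base_b_to_10(n, b):
--     # staged passes: decode all digits first, validate them wholesale,
--     # then sum explicit positional weights over the reversed digit list
--     vals = [digit_to_val(d) for d in n]
--     if any(v < 0 or v >= b for v in vals):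
--         return -1
--     return sum(v * b ** i for i, v in enumerate(reversed(vals)))
-- ===== Notes on version B (the rewrite author's own statement) =====
-- stated objective: alternative
-- what changed: B replaces A's single left-to-right Horner loop with early return by three staged passes: map every character to its digit value, validate the whole list with any(), then sum explicit positional weights v*b**i over the reversed value list.
import Mathlib
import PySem

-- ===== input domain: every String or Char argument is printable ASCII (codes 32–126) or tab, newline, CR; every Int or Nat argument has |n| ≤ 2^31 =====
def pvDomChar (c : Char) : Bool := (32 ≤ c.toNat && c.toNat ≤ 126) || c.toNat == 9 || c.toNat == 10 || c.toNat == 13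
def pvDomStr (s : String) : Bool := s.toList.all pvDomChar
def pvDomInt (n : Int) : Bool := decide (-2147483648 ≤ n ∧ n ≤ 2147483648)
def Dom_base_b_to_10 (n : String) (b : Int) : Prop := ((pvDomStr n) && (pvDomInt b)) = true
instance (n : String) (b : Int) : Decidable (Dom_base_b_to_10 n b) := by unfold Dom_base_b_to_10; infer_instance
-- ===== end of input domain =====

-- B restructures the computation: instead of A's single Horner loop with early return,
-- B decodes the digits, validates the whole list, then sums explicit positional weights
-- (objective: alternative, same cost).

-- ===== PORT A =====
-- digit_to_val: digit.upper() ported with PySem.Chars.upperChar (exact on ASCII)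
def digitToVal (c : Char) : Int :=
  if '0' ≤ c ∧ c ≤ '9' then (c.toNat : Int) - ('0'.toNat : Int)
  else if 'A' ≤ PySem.Chars.upperChar c ∧ PySem.Chars.upperChar c ≤ 'F' then
    ((PySem.Chars.upperChar c).toNat : Int) - ('A'.toNat : Int) + 10
  else -1

-- the for-loop of A: Horner accumulator, early return -1 on an invalid digit
def aLoop (b : Int) : List Char → Int → Int
  | [], n10 => n10
  | c :: cs, n10 =>
    let val := digitToVal c
    if val < 0 ∨ val ≥ b then -1 else aLoop b cs (n10 * b + val)

def base_b_to_10 (n : String) (b : Int) : Int :=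
  aLoop b n.toList 0

-- ===== PORT B =====
-- vals = [digit_to_val(d) for d in n]; any(...) ; sum(v * b**i for i, v in enumerate(reversed(vals)))
-- enumerate indices are ≥ 0, so `b ** i` is ported as `b ^ p.1.toNat` (exact here)
def base_b_to_10_alt (n : String) (b : Int) : Int :=
  let vals := n.toList.map digitToVal
  if vals.any (fun v => decide (v < 0) || decide (v ≥ b)) then -1
  else ((PySem.List.enumerate vals.reverse).map (fun p => p.2 * b ^ p.1.toNat)).sum

-- ===== PRECONDITION & SPEC =====
def Spec_base_b_to_10 (n : String) (b : Int) (out : Int) : Prop := out = base_b_to_10_alt n b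
instance (n : String) (b : Int) (out : Int) : Decidable (Spec_base_b_to_10 n b out) := by unfold Spec_base_b_to_10; infer_instance

-- ===== CLAIM (what is proved, stated in full; the proofs are below) =====
def Claim_equal_base_b_to_10 : Prop := ∀ (n : String) (b : Int), Dom_base_b_to_10 n b → Spec_base_b_to_10 n b (base_b_to_10 n b)

-- ===== LEMMAS AND PROOFS =====

-- little-endian value of a list of digit values (head = least significant)
def vposVal (b : Int) : List Int → Int
  | [] => 0
  | v :: vs => v + b * vposVal b vs

theorem enumerate_sum (b : Int) (r : List Int) (s : Int) (hs : 0 ≤ s) :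
    ((PySem.List.enumerate r s).map (fun p => p.2 * b ^ p.1.toNat)).sum
      = b ^ s.toNat * vposVal b r := by
  induction r generalizing s with
  | nil => simp [PySem.List.enumerate_nil, vposVal]
  | cons v vs ih =>
    rw [PySem.List.enumerate_cons]
    have h1 : (0:Int) ≤ s + 1 := by omega
    have ht : (s + 1).toNat = s.toNat + 1 := by omega
    simp only [List.map_cons, List.sum_cons, ih (s + 1) h1, ht, vposVal]
    ring

theorem vposVal_append (b : Int) (r : List Int) (v : Int) :
    vposVal b (r ++ [v]) = vposVal b r + v * b ^ r.length := by
  induction r with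
  | nil => simp [vposVal]
  | cons d ds ih => simp [vposVal, ih, pow_succ]; ring

-- every digit of l is valid for base b
def allValid (b : Int) (l : List Char) : Prop :=
  ∀ c ∈ l, ¬ (digitToVal c < 0 ∨ digitToVal c ≥ b)

theorem aLoop_invalid (b : Int) (l : List Char) (h : ¬ allValid b l) (acc : Int) :
    aLoop b l acc = -1 := by
  induction l generalizing acc with
  | nil => exact absurd (fun c hc => absurd hc (by simp)) h
  | cons c cs ih =>
    simp only [aLoop]
    split
    · rfl
    · rename_i hv
      apply ih
      intro hall
      exact h (fun d hd => by
        rcases List.mem_cons.mp hd with rfl | hd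
        · exact hv
        · exact hall d hd)

theorem aLoop_valid (b : Int) (l : List Char) (h : allValid b l) (acc : Int) :
    aLoop b l acc = acc * b ^ l.length + vposVal b (l.map digitToVal).reverse := by
  induction l generalizing acc with
  | nil => simp [aLoop, vposVal]
  | cons c cs ih =>
    have hc : ¬ (digitToVal c < 0 ∨ digitToVal c ≥ b) := h c (by simp)
    have hcs : allValid b cs := fun d hd => h d (List.mem_cons_of_mem _ hd)
    simp only [aLoop, hc, if_false]
    rw [ih hcs]
    simp only [List.map_cons, List.reverse_cons, vposVal_append, List.length_cons,
      List.length_reverse, List.length_map]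
    rw [pow_succ]
    ring

theorem any_iff_not_allValid (b : Int) (l : List Char) :
    ((l.map digitToVal).any (fun v => decide (v < 0) || decide (v ≥ b)) = true)
      ↔ ¬ allValid b l := by
  unfold allValid
  rw [List.any_map, List.any_eq_true]
  push Not
  constructor
  · rintro ⟨c, hc, hv⟩
    refine ⟨c, hc, ?_⟩
    simpa [Bool.or_eq_true, decide_eq_true_iff] using hv
  · rintro ⟨c, hc, hv⟩
    exact ⟨c, hc, by simpa [Bool.or_eq_true, decide_eq_true_iff] using hv⟩

-- ===== VERDICT (by name: the statement is the Claim_ definition above) =====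
theorem base_b_to_10_spec : Claim_equal_base_b_to_10 := by
  intro n b _
  unfold Spec_base_b_to_10 base_b_to_10 base_b_to_10_alt
  by_cases h : allValid b n.toList
  · have hany : ¬ ((n.toList.map digitToVal).any
        (fun v => decide (v < 0) || decide (v ≥ b)) = true) :=
      fun ha => ((any_iff_not_allValid b n.toList).mp ha) h
    simp only [hany]
    rw [aLoop_valid b _ h 0, enumerate_sum b _ 0 le_rfl]
    simp
  · have hany := (any_iff_not_allValid b n.toList).mpr h
    simp only [hany, if_true]
    exact aLoop_invalid b _ h 0
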